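-- pv_equiv track=rewrite | github.com/maheshkrishnachalla/DATASTR-N-ALGOR | src/SlidingWindow/find_the_repeated_substring_in_string.py | find_all_repeated_substrings
-- ===== SOURCE A (Python) =====
-- def find_all_repeated_substrings(s):
--     max_len = 1
--     runs = []
--     i = 0
--     while i < len(s):
--         char = s[i]
--         j = i
--         while j < len(s) and s[j] == char:
--             j += 1
--         length = j-i
--         if length > max_len:
--             max_len = length
--             #runs = [s[i:j]]
--             runs.append(s[i:j])
--         elif length == max_len:
--             runs.append(s[i:j])
--         i = j
--     return  runs
-- ===== SOURCE B (Python) =====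
-- def find_all_repeated_substrings(s):
--     n = len(s)
--     # boundary indices where a new character run starts
--     bounds = [k for k in range(1, n) if s[k] != s[k - 1]]
--     starts = [0] + bounds
--     ends = bounds + [n]
--     # materialize the prefix maxima of the run lengths (floored at 1)
--     prefmax = []
--     m = 1
--     for b, e in zip(starts, ends):
--         if e - b > m:
--             m = e - b
--         prefmax.append(m)
--     # a run is kept iff its length equals the prefix maximum at its position
--     return [s[b:e] for (b, e), M in zip(zip(starts, ends), prefmax) if e - b == M]
-- ===== Notes on version B (the rewrite author's own statement) =====
-- stated objective: alternative
-- what changed: A's single interleaved scan (outer index loop with an inner while advancing over each run, appending under a mutable running max) is replaced by an index-arithmetic pipeline: compute the run-boundary index list, pair it into (start,end) intervals, materialize the prefix-maxima list of interval lengths, and keep each interval whose length equals its prefix maximum.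
import Mathlib
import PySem

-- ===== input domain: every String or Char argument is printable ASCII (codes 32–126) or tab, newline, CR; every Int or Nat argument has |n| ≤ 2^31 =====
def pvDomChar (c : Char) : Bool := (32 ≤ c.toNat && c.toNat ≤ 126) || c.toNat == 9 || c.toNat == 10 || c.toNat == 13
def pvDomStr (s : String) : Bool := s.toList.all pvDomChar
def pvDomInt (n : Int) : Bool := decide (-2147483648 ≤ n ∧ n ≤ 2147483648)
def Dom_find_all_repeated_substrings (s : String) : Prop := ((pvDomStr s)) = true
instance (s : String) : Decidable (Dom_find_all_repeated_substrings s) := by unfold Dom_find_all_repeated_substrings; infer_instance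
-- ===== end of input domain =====

-- B replaces A's interleaved scan-and-decide with run-boundary indices, a materialized
-- prefix-maxima list and a record-equality filter (objective: alternative; same value).

-- ===== PORT A =====
-- A's outer while loop over index i, with the inner while advancing j over the run of
-- s[i]; the run s[i:j] is c :: (chars after c equal to c), the loop continues at j.
def findA (cs : List Char) (maxLen : Int) : List String :=
  match cs with
  | [] => []
  | c :: rest =>
    let run := rest.takeWhile (· == c)
    let length : Int := (run.length : Int) + 1
    let tail := rest.dropWhile (· == c)
    if length > maxLen then String.mk (c :: run) :: findA tail length
    else if length == maxLen then String.mk (c :: run) :: findA tail maxLen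
    else findA tail maxLen
termination_by cs.length
decreasing_by
  all_goals
    simpa using Nat.lt_succ_of_le (List.length_dropWhile_le (· == c) rest)

def find_all_repeated_substrings (s : String) : List String :=
  findA s.toList 1

-- ===== PORT B =====
-- the comprehension [k for k in range(1, n) if s[k] != s[k-1]]; all k are in range,
-- so s[k] is exactly getD k (range(1,n) = List.range' 1 (n-1)).
def pvBounds (cs : List Char) : List Nat :=
  (List.range' 1 (cs.length - 1)).filter (fun k => cs.getD k ' ' ≠ cs.getD (k - 1) ' ')

-- the prefix-maxima loop: m starts at 1, m = max(m, e-b) appended per pair.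
def pvPrefMax (pairs : List (Nat × Nat)) (m : Nat) : List Nat :=
  match pairs with
  | [] => []
  | (b, e) :: rest =>
    (if e - b > m then e - b else m) :: pvPrefMax rest (if e - b > m then e - b else m)

-- s[b:e] with 0 ≤ b ≤ e ≤ n is exactly (drop b).take (e-b).
def find_all_repeated_substrings_alt (s : String) : List String :=
  let cs := s.toList
  let n := cs.length
  let bounds := pvBounds cs
  let starts := 0 :: bounds
  let ends := bounds ++ [n]
  let pairs := starts.zip ends
  let prefmax := pvPrefMax pairs 1
  ((pairs.zip prefmax).filter (fun p => p.1.2 - p.1.1 == p.2)).map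
    (fun p => String.mk ((cs.drop p.1.1).take (p.1.2 - p.1.1)))

-- ===== PRECONDITION & SPEC =====
def Spec_find_all_repeated_substrings (s : String) (out : List String) : Prop := out = find_all_repeated_substrings_alt s
instance (s : String) (out : List String) : Decidable (Spec_find_all_repeated_substrings s out) := by unfold Spec_find_all_repeated_substrings; infer_instance

-- ===== CLAIM (what is proved, stated in full; the proofs are below) =====
def Claim_equal_find_all_repeated_substrings : Prop := ∀ (s : String), Dom_find_all_repeated_substrings s → Spec_find_all_repeated_substrings s (find_all_repeated_substrings s)

-- ===== LEMMAS AND PROOFS =====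

-- run decomposition of a char list (only its functional-induction principle is used)
def runsOf (cs : List Char) : List (List Char) :=
  match cs with
  | [] => []
  | c :: rest =>
    (c :: rest.takeWhile (· == c)) :: runsOf (rest.dropWhile (· == c))
termination_by cs.length
decreasing_by
  simpa using Nat.lt_succ_of_le (List.length_dropWhile_le (· == c) rest)

def pairsOf (cs : List Char) : List (Nat × Nat) :=
  (0 :: pvBounds cs).zip (pvBounds cs ++ [cs.length])

-- intermediate form of B's final comprehension
def altPass (pairs : List (Nat × Nat)) (cs : List Char) (m : Nat) : List String :=
  match pairs with
  | [] => []
  | (b, e) :: rest =>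
    (if e - b ≥ m then [String.mk ((cs.drop b).take (e - b))] else []) ++
      altPass rest cs (max m (e - b))

theorem altPass_eq_zip (pairs : List (Nat × Nat)) (cs : List Char) (m : Nat) :
    ((pairs.zip (pvPrefMax pairs m)).filter (fun p => p.1.2 - p.1.1 == p.2)).map
      (fun p => String.mk ((cs.drop p.1.1).take (p.1.2 - p.1.1)))
      = altPass pairs cs m := by
  induction pairs generalizing m with
  | nil => rfl
  | cons p rest ih =>
    obtain ⟨b, e⟩ := p
    by_cases h : e - b > m
    · have hm : max m (e - b) = e - b := by omega
      simp only [pvPrefMax, altPass, if_pos h, hm, List.zip_cons_cons, List.filter_cons,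
        beq_self_eq_true, if_true, List.map_cons, ih, if_pos (show e - b ≥ m by omega)]
      rfl
    · have hm : max m (e - b) = m := by omega
      by_cases h2 : e - b = m
      · simp only [pvPrefMax, altPass, if_neg h, hm, List.zip_cons_cons, List.filter_cons,
          show (e - b == m) = true by simpa using h2, if_true, List.map_cons, ih,
          if_pos (show e - b ≥ m by omega)]
        rfl
      · simp only [pvPrefMax, altPass, if_neg h, hm, List.zip_cons_cons, List.filter_cons,
          show (e - b == m) = false by simpa using h2, Bool.false_eq_true, if_false, ih,
          if_neg (show ¬ e - b ≥ m by omega), List.nil_append]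

theorem altPass_shift (pairs : List (Nat × Nat)) (cs : List Char) (ℓ m : Nat) :
    altPass (pairs.map (fun p => (p.1 + ℓ, p.2 + ℓ))) cs m
      = altPass pairs (cs.drop ℓ) m := by
  induction pairs generalizing m with
  | nil => rfl
  | cons p rest ih =>
    obtain ⟨b, e⟩ := p
    simp only [List.map_cons, altPass]
    rw [show e + ℓ - (b + ℓ) = e - b by omega, ih,
      show cs.drop (b + ℓ) = (cs.drop ℓ).drop b by
        rw [List.drop_drop]; congr 1; omega]

theorem dropWhile_head_false {c h : Char} {rest d : List Char}
    (hd : rest.dropWhile (· == c) = h :: d) : (h == c) = false := by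
  induction rest with
  | nil => simp [List.dropWhile] at hd
  | cons x xs ih =>
    rw [List.dropWhile_cons] at hd
    by_cases hx : (x == c) = true
    · rw [if_pos hx] at hd; exact ih hd
    · rw [if_neg hx] at hd
      cases hd
      simpa using hx

theorem drop_takeWhile_length (p : Char → Bool) (l : List Char) :
    l.drop (l.takeWhile p).length = l.dropWhile p := by
  induction l with
  | nil => rfl
  | cons a l ih =>
    rw [List.takeWhile_cons, List.dropWhile_cons]
    by_cases h : p a = true
    · simp only [if_pos h, List.length_cons, List.drop_succ_cons]
      exact ih
    · simp [h]

theorem bounds_cons (c : Char) (rest : List Char) :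
    pvBounds (c :: rest)
      = (if (rest.dropWhile (· == c)) = [] then []
         else ((rest.takeWhile (· == c)).length + 1)
           :: (pvBounds (rest.dropWhile (· == c))).map
                (· + ((rest.takeWhile (· == c)).length + 1))) := by
  set t := rest.takeWhile (· == c) with ht
  set d := rest.dropWhile (· == c) with hdd
  set ℓ := t.length + 1 with hℓ
  have hsplit : (c :: rest) = (c :: t) ++ d := by
    simp [ht, hdd, List.takeWhile_append_dropWhile]
  have hlenr : t.length + d.length = rest.length := by
    rw [ht, hdd, ← List.length_append, List.takeWhile_append_dropWhile]
  have hlen : (c :: rest).length - 1 = (ℓ - 1) + d.length := by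
    simp only [List.length_cons]
    omega
  have hct : ∀ x ∈ c :: t, x = c := by
    intro x hx
    rw [List.mem_cons] at hx
    rcases hx with rfl | hx
    · rfl
    · simpa using List.mem_takeWhile_imp hx
  have hgetc : ∀ k, k ≤ t.length → (c :: rest).getD k ' ' = c := by
    intro k hk
    rw [hsplit]
    have hklt : k < (c :: t).length := by simp only [List.length_cons]; omega
    rw [List.getD_eq_getElem?_getD, List.getElem?_append_left hklt,
      List.getElem?_eq_getElem hklt]
    exact hct _ (List.getElem_mem hklt)
  have hrange : List.range' 1 ((c :: rest).length - 1)
      = List.range' 1 (ℓ - 1) ++ List.range' ℓ d.length := by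
    have h2 := List.range'_append (s := 1) (m := ℓ - 1) (n := d.length) (step := 1)
    rw [show 1 + 1 * (ℓ - 1) = ℓ from by omega] at h2
    rw [hlen, ← h2]
  unfold pvBounds
  rw [hrange, List.filter_append]
  have hleft : (List.range' 1 (ℓ - 1)).filter
      (fun k => decide ((c :: rest).getD k ' ' ≠ (c :: rest).getD (k - 1) ' ')) = [] := by
    rw [List.filter_eq_nil_iff]
    intro k hk
    rw [List.mem_range'] at hk
    have h1 : (c :: rest).getD k ' ' = c := hgetc k (by omega)
    have h2 : (c :: rest).getD (k - 1) ' ' = c := hgetc (k - 1) (by omega)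
    rw [h1, h2]
    simp
  rw [hleft, List.nil_append]
  by_cases hd0 : d = []
  · simp [hd0]
  · obtain ⟨h, d', hdc⟩ := List.exists_cons_of_ne_nil hd0
    rw [if_neg hd0]
    have hdl : d.length = d'.length + 1 := by rw [hdc]; rfl
    have hdrop : (c :: rest).drop ℓ = d := by
      rw [hℓ, List.drop_succ_cons, ht, drop_takeWhile_length, ← hdd]
    have hgetd : ∀ k, (c :: rest).getD (ℓ + k) ' ' = d.getD k ' ' := by
      intro k
      rw [List.getD_eq_getElem?_getD, List.getD_eq_getElem?_getD, ← hdrop,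
        List.getElem?_drop]
    have hrange2 : List.range' ℓ d.length = ℓ :: List.range' (ℓ + 1) d'.length := by
      rw [hdl]
      rfl
    rw [hrange2, List.filter_cons]
    have hkeep : (decide ((c :: rest).getD ℓ ' ' ≠ (c :: rest).getD (ℓ - 1) ' ')) = true := by
      have h1 : (c :: rest).getD ℓ ' ' = h := by
        have h0 := hgetd 0
        rw [hdc] at h0
        simpa using h0
      have h2 : (c :: rest).getD (ℓ - 1) ' ' = c := hgetc (ℓ - 1) (by omega)
      have hne : (h == c) = false := dropWhile_head_false (hdd.symm.trans hdc)
      rw [h1, h2]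
      exact decide_eq_true (fun hh => by rw [hh] at hne; simp at hne)
    rw [if_pos hkeep]
    congr 1
    rw [show d.length - 1 = d'.length from by omega]
    have hr : List.range' (ℓ + 1) d'.length = (List.range' 1 d'.length).map (· + ℓ) := by
      rw [List.range'_eq_map_range, List.range'_eq_map_range, List.map_map]
      apply List.map_congr_left
      intro a _
      simp
      omega
    rw [hr, List.filter_map]
    congr 1
    apply List.filter_congr
    intro k hk
    rw [List.mem_range'] at hk
    have e1 : (c :: rest).getD (k + ℓ) ' ' = d.getD k ' ' := by
      rw [Nat.add_comm]
      exact hgetd k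
    have e2 : (c :: rest).getD (k + ℓ - 1) ' ' = d.getD (k - 1) ' ' := by
      rw [show k + ℓ - 1 = ℓ + (k - 1) from by omega]
      exact hgetd (k - 1)
    simp only [Function.comp_apply, e1, e2]

theorem pairs_cons (c : Char) (rest : List Char)
    (hd0 : rest.dropWhile (· == c) ≠ []) :
    pairsOf (c :: rest)
      = (0, (rest.takeWhile (· == c)).length + 1)
        :: (pairsOf (rest.dropWhile (· == c))).map
             (fun p => (p.1 + ((rest.takeWhile (· == c)).length + 1),
                        p.2 + ((rest.takeWhile (· == c)).length + 1))) := by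
  set t := rest.takeWhile (· == c) with ht
  set d := rest.dropWhile (· == c) with hdd
  set ℓ := t.length + 1 with hℓ
  have hlen : (c :: rest).length = d.length + ℓ := by
    have h : t.length + d.length = rest.length := by
      rw [ht, hdd, ← List.length_append, List.takeWhile_append_dropWhile]
    simp only [List.length_cons]
    omega
  unfold pairsOf
  rw [bounds_cons, if_neg hd0, hlen]
  rw [List.cons_append, List.zip_cons_cons]
  congr 1
  have e1 : (ℓ :: (pvBounds d).map (· + ℓ)) = (0 :: pvBounds d).map (· + ℓ) := by simp
  have e2 : ((pvBounds d).map (· + ℓ) ++ [d.length + ℓ])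
      = (pvBounds d ++ [d.length]).map (· + ℓ) := by simp
  rw [e1, e2, List.zip_map]
  apply List.map_congr_left
  intro p _
  rfl

theorem main_eq (cs : List Char) :
    ∀ m : Nat, 1 ≤ m → findA cs (m : Int) = altPass (pairsOf cs) cs m := by
  induction cs using runsOf.induct with
  | case1 =>
    intro m hm
    simp [findA, altPass, pairsOf, pvBounds, show ¬ (0 ≥ m) from by omega]
  | case2 c rest ih =>
    intro m hm
    by_cases hd : rest.dropWhile (· == c) = []
    · have htw : rest.takeWhile (· == c) = rest := by
        have h := List.takeWhile_append_dropWhile (p := (· == c)) (l := rest)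
        rw [hd, List.append_nil] at h
        exact h
      have hpairs : pairsOf (c :: rest) = [(0, rest.length + 1)] := by
        unfold pairsOf
        rw [bounds_cons, if_pos hd]
        simp
      rw [findA, hpairs, altPass, altPass]
      simp only [htw, hd, List.drop_zero, Nat.sub_zero, List.append_nil]
      have htake : (c :: rest).take (rest.length + 1) = c :: rest := by simp
      by_cases h1 : (rest.length : Int) + 1 > (m : Int)
      · rw [if_pos h1, if_pos (show rest.length + 1 ≥ m by omega)]
        simp [findA, htake]
      · rw [if_neg h1]
        by_cases h2 : rest.length + 1 = m
        · rw [if_pos (show (((rest.length : Int) + 1 == (m : Int)) = true) by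
              simp only [beq_iff_eq]; omega),
            if_pos (show rest.length + 1 ≥ m by omega)]
          simp [findA, htake]
        · rw [if_neg (show ¬ (((rest.length : Int) + 1 == (m : Int)) = true) by
              simp only [beq_iff_eq]; omega),
            if_neg (show ¬ (rest.length + 1 ≥ m) by omega)]
          simp [findA]
    · have hpairs := pairs_cons c rest hd
      set t := rest.takeWhile (· == c) with ht
      set d := rest.dropWhile (· == c) with hdd
      set ℓ := t.length + 1 with hℓ
      have hdrop : (c :: rest).drop ℓ = d := by
        rw [hℓ, List.drop_succ_cons, ht, drop_takeWhile_length, ← hdd]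
      have htake : (c :: rest).take ℓ = c :: t := by
        rw [hℓ, List.take_succ_cons, ht]
        congr 1
        exact (List.prefix_iff_eq_take.mp (List.takeWhile_prefix _)).symm
      rw [findA, hpairs, altPass, altPass_shift, hdrop]
      simp only [Nat.sub_zero, List.drop_zero, htake]
      by_cases h1 : (t.length : Int) + 1 > (m : Int)
      · rw [if_pos h1, if_pos (show ℓ ≥ m by omega),
          show max m ℓ = ℓ from by omega]
        rw [show ((t.length : Int) + 1) = (ℓ : Int) from by rw [hℓ]; push_cast; ring]
        rw [ih ℓ (by omega)]
        rfl
      · have hle : ℓ ≤ m := by omega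
        rw [if_neg h1, show max m ℓ = m from by omega]
        by_cases h2 : ℓ = m
        · rw [if_pos (show (((t.length : Int) + 1) == (m : Int)) = true by
              simp only [beq_iff_eq]; omega),
            if_pos (show ℓ ≥ m by omega)]
          rw [ih m hm]
          rfl
        · rw [if_neg (show ¬ ((((t.length : Int) + 1) == (m : Int)) = true) by
              simp only [beq_iff_eq]; omega),
            if_neg (show ¬ (ℓ ≥ m) by omega)]
          rw [ih m hm]
          rfl

-- ===== VERDICT (by name: the statement is the Claim_ definition above) =====
theorem find_all_repeated_substrings_spec : Claim_equal_find_all_repeated_substrings := by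
  intro s _
  unfold Spec_find_all_repeated_substrings find_all_repeated_substrings find_all_repeated_substrings_alt
  rw [altPass_eq_zip]
  have h := main_eq s.toList 1 le_rfl
  unfold pairsOf at h
  exact_mod_cast h
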